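-- pv_equiv track=rewrite | github.com/oobondes/adventofcode2015 | aoc2015.py | day_3_final
-- ===== SOURCE A (Python) =====
-- def day_3_final(text):
--     point_s = (0, 0)
--     point_r = (0, 0)
--     op = {"v": (0, -1), "^": (0, 1), "<": (-1, 0), ">": (1, 0)}
--     visited = {point_s}
--     for i, direction in enumerate(text):
--         x, y = op[direction]
--         if i % 2 == 0:
--             point_s = (point_s[0] + x, point_s[1] + y)
--             visited.add(point_s)
--         else:
--             point_r = (point_r[0] + x, point_r[1] + y)
--             visited.add(point_r)
--     return len(visited)
-- ===== SOURCE B (Python) =====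
-- def day_3_final(text):
--     op = {"v": (0, -1), "^": (0, 1), "<": (-1, 0), ">": (1, 0)}
--     visited = {(0, 0)}
--     for stream in (text[::2], text[1::2]):
--         x, y = 0, 0
--         for d in stream:
--             dx, dy = op[d]
--             x, y = x + dx, y + dy
--             visited.add((x, y))
--     return len(visited)
-- ===== Notes on version B (the rewrite author's own statement) =====
-- stated objective: alternative
-- what changed: Instead of one interleaved pass that branches on i % 2 with two live position accumulators, B deinterleaves the input into the two move streams text[::2] and text[1::2] and traces each stream independently from the origin into the shared visited set.
import Mathlib
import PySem

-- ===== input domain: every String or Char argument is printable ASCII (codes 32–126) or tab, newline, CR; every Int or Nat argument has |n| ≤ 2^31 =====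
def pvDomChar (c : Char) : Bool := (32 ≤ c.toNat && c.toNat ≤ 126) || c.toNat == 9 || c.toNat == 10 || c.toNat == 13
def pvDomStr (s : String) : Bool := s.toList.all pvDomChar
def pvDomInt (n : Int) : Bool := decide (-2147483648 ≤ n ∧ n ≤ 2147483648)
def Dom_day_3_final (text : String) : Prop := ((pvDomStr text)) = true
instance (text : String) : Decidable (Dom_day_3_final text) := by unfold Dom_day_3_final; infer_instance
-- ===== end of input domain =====

-- B replaces A's single interleaved i%2-branching pass by two independent traces over the
-- deinterleaved streams text[::2] and text[1::2] (objective: alternative decomposition).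

-- ===== PORT A =====
-- the move dict op (identical literal in both Pythons)
def pvOp : PySem.Dict Char (Int × Int) :=
  ⟨[('v', ((0 : Int), (-1 : Int))), ('^', (0, 1)), ('<', (-1, 0)), ('>', (1, 0))]⟩

-- loop body of A's 'for i, direction in enumerate(text)'
def pvStepA (st : (Int × Int) × (Int × Int) × PySem.Set (Int × Int)) (p : Int × Char) :
    (Int × Int) × (Int × Int) × PySem.Set (Int × Int) :=
  let d := PySem.Dict.getD pvOp p.2 (0, 0)   -- op[direction]; KeyError excluded by Pre_
  if PySem.Int.mod p.1 2 == 0 then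
    let ps := (st.1.1 + d.1, st.1.2 + d.2)
    (ps, st.2.1, PySem.Set.add st.2.2 ps)
  else
    let pr := (st.2.1.1 + d.1, st.2.1.2 + d.2)
    (st.1, pr, PySem.Set.add st.2.2 pr)

def day_3_final (text : String) : Int :=
  PySem.Set.len
    ((PySem.List.enumerate text.toList).foldl pvStepA
      ((0, 0), (0, 0), [((0 : Int), (0 : Int))])).2.2

-- ===== PORT B =====
-- inner loop of Source B: trace one stream from (x,y)=(0,0), adding each stepped position
def pvTrace (stream : List Char) (start : (Int × Int) × PySem.Set (Int × Int)) :
    (Int × Int) × PySem.Set (Int × Int) :=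
  stream.foldl (fun st c =>
    let d := PySem.Dict.getD pvOp c (0, 0)   -- op[d]; KeyError excluded by Pre_
    let q := (st.1.1 + d.1, st.1.2 + d.2)
    (q, PySem.Set.add st.2 q)) start

def day_3_final_alt (text : String) : Int :=
  let evens := (PySem.List.slice? text.toList none none 2).getD []      -- text[::2]
  let odds := (PySem.List.slice? text.toList (some 1) none 2).getD []   -- text[1::2]
  let v1 := (pvTrace evens ((0, 0), [((0 : Int), (0 : Int))])).2
  let v2 := (pvTrace odds ((0, 0), v1)).2
  PySem.Set.len v2

-- ===== PRECONDITION & SPEC =====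
-- Pre_: exactly the inputs on which A returns; on any other character op[direction] raises KeyError.
def Pre_day_3_final (text : String) : Prop :=
  (text.toList.all (fun c => c == 'v' || c == '^' || c == '<' || c == '>')) = true
instance (text : String) : Decidable (Pre_day_3_final text) := by
  unfold Pre_day_3_final; infer_instance

def pvWitness_day_3_final : String := "^>v<"

def Spec_day_3_final (text : String) (out : Int) : Prop := out = day_3_final_alt text
instance (text : String) (out : Int) : Decidable (Spec_day_3_final text out) := by
  unfold Spec_day_3_final; infer_instance

-- ===== CLAIM (what is proved, stated in full; the proofs are below) =====
def Claim_equal_day_3_final : Prop :=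
  ∀ (text : String), Dom_day_3_final text → Pre_day_3_final text →
    Spec_day_3_final text (day_3_final text)

-- ===== LEMMAS AND PROOFS =====

-- every other element, starting with the first (text[::2] on lists)
def pvEveryOther {α : Type} : List α → List α
  | [] => []
  | [a] => [a]
  | a :: _ :: t => a :: pvEveryOther t

theorem pvEveryOther_cons {α : Type} (x : α) (l : List α) :
    pvEveryOther (x :: l) = x :: pvEveryOther l.tail := by
  cases l <;> rfl

-- the positions visited when stepping from p through the moves cs
def pvPts (p : Int × Int) : List Char → List (Int × Int)
  | [] => []
  | c :: cs =>
    let d := PySem.Dict.getD pvOp c (0, 0)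
    let q := (p.1 + d.1, p.2 + d.2)
    q :: pvPts q cs

-- alternating merge: the insertion order of A's interleaved loop
def pvInterleave {α : Type} : List α → List α → List α
  | [], ys => ys
  | x :: xs, ys => x :: pvInterleave ys xs
termination_by xs ys => xs.length + ys.length
decreasing_by simp; omega

theorem pvMem_interleave {α : Type} (xs ys : List α) (y : α) :
    y ∈ pvInterleave xs ys ↔ y ∈ xs ∨ y ∈ ys := by
  induction xs, ys using pvInterleave.induct with
  | case1 ys => simp [pvInterleave]
  | case2 x xs ys ih => simp [pvInterleave, ih]; tauto

-- text[::2] and text[1::2] computed by slice? are pvEveryOther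
theorem pvFilt {α : Type} (xs : List α) :
    List.filterMap (fun k => xs[2 * k]?) (List.range ((xs.length + 1) / 2)) =
      pvEveryOther xs := by
  induction xs using pvEveryOther.induct with
  | case1 => simp [pvEveryOther]
  | case2 a => simp [pvEveryOther]
  | case3 a b t ih =>
    have hlen : (a :: b :: t).length = t.length + 2 := by simp
    have hc : ((a :: b :: t).length + 1) / 2 = (t.length + 1) / 2 + 1 := by
      rw [hlen]; omega
    rw [hc, List.range_succ_eq_map, List.filterMap_cons, List.filterMap_map]
    simp only [Nat.mul_zero, List.getElem?_cons_zero, pvEveryOther]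
    congr 1

theorem pvSliceEven {α : Type} (xs : List α) :
    (PySem.List.slice? xs none none 2).getD [] = pvEveryOther xs := by
  simp only [PySem.List.slice?, PySem.List.sliceIndices]
  norm_num
  have hcount : (if 0 < xs.length then (((xs.length : Int) + 2 - 1) / 2).toNat else 0)
      = (xs.length + 1) / 2 := by split_ifs with h <;> omega
  rw [hcount, ← pvFilt xs]
  apply List.filterMap_congr
  intro k _
  have h1 : ((2 * (k : Int))).toNat = 2 * k := by omega
  rw [h1]

theorem pvSliceOdd {α : Type} (xs : List α) :
    (PySem.List.slice? xs (some 1) none 2).getD [] = pvEveryOther xs.tail := by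
  simp only [PySem.List.slice?, PySem.List.sliceIndices]
  norm_num
  cases xs with
  | nil => simp [pvEveryOther]
  | cons a t =>
    have hmin : min 1 ((a :: t).length : Int) = 1 := by simp
    rw [hmin]
    have hcount : (if 1 < (a :: t).length then
        (((((a :: t).length : Int)) - 1 + 2 - 1) / 2).toNat else 0) = (t.length + 1) / 2 := by
      split_ifs with h <;> simp only [List.length_cons] at h ⊢ <;> omega
    rw [hcount, List.tail_cons, ← pvFilt t]
    apply List.filterMap_congr
    intro k _
    have h1 : (1 + 2 * (k : Int)).toNat = 2 * k + 1 := by omega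
    rw [h1]
    simp

-- B's inner loop is an update with the traced positions
theorem pvTrace_snd (s : List Char) (p : Int × Int) (V : PySem.Set (Int × Int)) :
    (pvTrace s (p, V)).2 = V.update (pvPts p s) := by
  induction s generalizing p V with
  | nil => simp [pvTrace, pvPts, PySem.Set.update_nil]
  | cons c cs ih =>
    simp only [pvTrace, List.foldl_cons, pvPts, pvPts, PySem.Set.update_cons] at *
    exact ih _ _

-- A's loop is an update with the alternating merge of the two traces
theorem pvA_fold (t : List Char) :
    ∀ (i : Int) (s r : Int × Int) (V : PySem.Set (Int × Int)), i % 2 = 0 →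
      ((PySem.List.enumerate t i).foldl pvStepA (s, r, V)).2.2 =
        V.update (pvInterleave (pvPts s (pvEveryOther t)) (pvPts r (pvEveryOther t.tail))) := by
  induction t using pvEveryOther.induct with
  | case1 =>
    intro i s r V _
    simp [PySem.List.enumerate_nil, pvEveryOther, pvPts, pvInterleave, PySem.Set.update_nil]
  | case2 a =>
    intro i s r V hi
    have hmb : (PySem.Int.mod i 2 == 0) = true := by
      simp only [beq_iff_eq, PySem.Int.mod_eq_emod_of_pos (by omega : (0:Int) < 2)]; omega
    simp only [PySem.List.enumerate_cons, PySem.List.enumerate_nil, List.foldl_cons,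
      List.foldl_nil, pvStepA, hmb, if_true]
    simp [pvEveryOther, pvPts, pvInterleave, PySem.Set.update_cons, PySem.Set.update_nil]
  | case3 a b t ih =>
    intro i s r V hi
    have hmb : (PySem.Int.mod i 2 == 0) = true := by
      simp only [beq_iff_eq, PySem.Int.mod_eq_emod_of_pos (by omega : (0:Int) < 2)]; omega
    have hmb1 : (PySem.Int.mod (i + 1) 2 == 0) = false := by
      simp only [beq_eq_false_iff_ne, ne_eq,
        PySem.Int.mod_eq_emod_of_pos (by omega : (0:Int) < 2)]; omega
    rw [PySem.List.enumerate_cons, PySem.List.enumerate_cons, List.foldl_cons, List.foldl_cons]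
    simp only [pvStepA, hmb, hmb1, if_true, Bool.false_eq_true, if_false]
    rw [ih (i + 1 + 1) _ _ _ (by omega)]
    simp only [pvEveryOther, List.tail_cons, pvEveryOther_cons, pvPts,
      pvInterleave, PySem.Set.update_cons]

-- Set.len of an update depends only on the updating list's members
theorem pvLen_update_congr (V : PySem.Set (Int × Int)) (hV : V.Nodup)
    (L1 L2 : List (Int × Int)) (h : ∀ y, y ∈ L1 ↔ y ∈ L2) :
    PySem.Set.len (V.update L1) = PySem.Set.len (V.update L2) := by
  have n1 := PySem.Set.nodup_update (s := V) (xs := L1) hV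
  have n2 := PySem.Set.nodup_update (s := V) (xs := L2) hV
  have hperm : (V.update L1).Perm (V.update L2) := by
    rw [List.perm_ext_iff_of_nodup n1 n2]
    intro y
    rw [PySem.Set.mem_update, PySem.Set.mem_update, h y]
  simp [PySem.Set.len, hperm.length_eq]

-- ===== VERDICT (by name: the statement is the Claim_ definition above) =====
theorem day_3_final_spec : Claim_equal_day_3_final := by
  intro text _ _
  unfold Spec_day_3_final day_3_final day_3_final_alt
  rw [pvSliceEven, pvSliceOdd]
  simp only [pvTrace_snd]
  rw [pvA_fold text.toList 0 (0, 0) (0, 0) _ (by omega), ← PySem.Set.update_append]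
  apply pvLen_update_congr
  · decide
  · intro y
    rw [pvMem_interleave, List.mem_append]
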